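-- pv_equiv track=rewrite | github.com/goranikin/snu_retrieval | src/data_augmentation/ipykernel_files/bm25_score.py | get_clean_paragraph_indices
-- ===== SOURCE A (Python) =====
-- from typing import Any, List, Tuple
-- from typing import Any, List, Tuple
--
-- def get_clean_full_paper(item: dict) -> str:
--     return item["full_paper"]
--
-- def get_clean_paragraph_indices(item: dict) -> List[Tuple[int, int]]:
--     text = get_clean_full_paper(item)
--     paragraph_indices = []
--     paragraph_start = 0
--     paragraph_end = 0
--     while paragraph_start < len(text):
--         paragraph_end = text.find("\n\n", paragraph_start)
--         if paragraph_end == -1: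
--             paragraph_end = len(text)
--         paragraph_indices.append((paragraph_start, paragraph_end))
--         paragraph_start = paragraph_end + 2
--     return paragraph_indices
-- ===== SOURCE B (Python) =====
-- from typing import Any, List, Tuple
--
-- def get_clean_paragraph_indices(item: dict) -> List[Tuple[int, int]]:
--     text = item["full_paper"]
--     n = len(text)
--     # phase 1: collect the start positions of all non-overlapping "\n\n" separators
--     seps = []
--     i = 0
--     while i < n - 1:
--         if text[i] == "\n" and text[i + 1] == "\n":
--             seps.append(i)
--             i += 2
--         else:
--             i += 1
--     # phase 2: turn separator positions into paragraph intervals, conditional tail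
--     out = []
--     prev = 0
--     for p in seps:
--         out.append((prev, p))
--         prev = p + 2
--     if prev < n:
--         out.append((prev, n))
--     return out
-- ===== Notes on version B (the rewrite author's own statement) =====
-- stated objective: alternative
-- what changed: A interleaves text.find("\n\n", start) with interval appending in a single while loop; B first collects all non-overlapping separator positions by a single character-pair scan, then in a second phase folds those positions into intervals with a conditional trailing interval (prev < len).
import Mathlib
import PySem

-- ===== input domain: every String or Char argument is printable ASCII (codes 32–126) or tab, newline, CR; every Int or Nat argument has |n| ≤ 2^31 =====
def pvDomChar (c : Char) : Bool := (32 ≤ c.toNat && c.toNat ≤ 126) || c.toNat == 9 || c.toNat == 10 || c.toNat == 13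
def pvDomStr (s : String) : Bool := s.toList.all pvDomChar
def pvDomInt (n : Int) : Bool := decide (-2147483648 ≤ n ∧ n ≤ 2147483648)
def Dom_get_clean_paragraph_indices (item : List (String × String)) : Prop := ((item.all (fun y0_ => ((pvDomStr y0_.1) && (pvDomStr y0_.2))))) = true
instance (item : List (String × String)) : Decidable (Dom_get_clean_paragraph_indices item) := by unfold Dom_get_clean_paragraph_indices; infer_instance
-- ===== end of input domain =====

-- B replaces A's interleaved find-and-append while loop by a two-phase shape:
-- collect all non-overlapping "\n\n" positions with a character-pair scan, then
-- fold them into intervals with a conditional trailing interval (objective: alternative, same cost).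

-- ===== PORT A =====
-- paragraph_end = text.find("\n\n", paragraph_start); if -1 then len(text)
def pvEndA (t : List Char) (start : Nat) : Int :=
  if PySem.Chars.findFrom t ['\n', '\n'] (start : Int) none = -1 then (t.length : Int)
  else PySem.Chars.findFrom t ['\n', '\n'] (start : Int) none

-- termination helper for A's while loop: the next start strictly increases
theorem pvEndA_ge (t : List Char) (start : Nat) (h : start < t.length) :
    start ≤ (pvEndA t start).toNat := by
  unfold pvEndA
  split
  · omega
  · rename_i hne
    have hk : start ≤ t.length := le_of_lt h
    have hspec := PySem.Chars.findFrom_natCast_spec t ['\n', '\n'] start hk hne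
    omega

-- A's while loop, step for step
def pvGoA (t : List Char) (start : Nat) : List (Int × Int) :=
  if h : start < t.length then
    ((start : Int), pvEndA t start) :: pvGoA t ((pvEndA t start).toNat + 2)
  else []
termination_by t.length + 1 - start
decreasing_by
  have := pvEndA_ge t start h
  omega

def get_clean_paragraph_indices (item : List (String × String)) : List (Int × Int) :=
  match List.lookup "full_paper" item with
  | some text => pvGoA text.toList 0
  | none => []      -- unreachable under Pre_ (Python raises KeyError)

-- ===== PORT B =====
-- phase 1 of Source B: the character-pair scan collecting non-overlapping "\n\n" positions
def pvSepsB : List Char → Int → List Int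
  | [], _ => []
  | [_], _ => []
  | c1 :: c2 :: rest, base =>
    if c1 = '\n' ∧ c2 = '\n' then base :: pvSepsB rest (base + 2)
    else pvSepsB (c2 :: rest) (base + 1)

-- phase 2 of Source B: fold separator positions into intervals, conditional tail
def pvIntervalsB (n : Int) : List Int → Int → List (Int × Int)
  | [], prev => if prev < n then [(prev, n)] else []
  | p :: rest, prev => (prev, p) :: pvIntervalsB n rest (p + 2)

def get_clean_paragraph_indices_alt (item : List (String × String)) : List (Int × Int) :=
  match List.lookup "full_paper" item with
  | some text => pvIntervalsB (text.toList.length : Int) (pvSepsB text.toList 0) 0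
  | none => []

-- ===== PRECONDITION & SPEC =====
-- Pre_ excludes exactly the items with no "full_paper" key, where Python A raises KeyError.
def Pre_get_clean_paragraph_indices (item : List (String × String)) : Prop :=
  (List.lookup "full_paper" item).isSome = true
instance (item : List (String × String)) : Decidable (Pre_get_clean_paragraph_indices item) := by
  unfold Pre_get_clean_paragraph_indices; infer_instance

def pvWitness_get_clean_paragraph_indices : (List (String × String)) :=
  [("full_paper", "ab\n\ncd")]

def Spec_get_clean_paragraph_indices (item : List (String × String)) (out : List (Int × Int)) : Prop := out = get_clean_paragraph_indices_alt item
instance (item : List (String × String)) (out : List (Int × Int)) : Decidable (Spec_get_clean_paragraph_indices item out) := by unfold Spec_get_clean_paragraph_indices; infer_instance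

-- ===== CLAIM (what is proved, stated in full; the proofs are below) =====
def Claim_equal_get_clean_paragraph_indices : Prop := ∀ (item : List (String × String)), Dom_get_clean_paragraph_indices item → Pre_get_clean_paragraph_indices item → Spec_get_clean_paragraph_indices item (get_clean_paragraph_indices item)

-- ===== LEMMAS AND PROOFS =====

-- find returns k when the pattern occurs at k and nowhere earlier
theorem pv_find_eq (d sub : List Char) (k : Nat)
    (hk : sub <+: d.drop k) (hmin : ∀ i, i < k → ¬ sub <+: d.drop i) :
    PySem.Chars.find d sub = (k : Int) := by
  have hinf : sub <:+: d := hk.isInfix.trans (List.drop_suffix k d).isInfix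
  have hnn : 0 ≤ PySem.Chars.find d sub := (PySem.Chars.find_nonneg_iff d sub).mpr hinf
  have hspec := PySem.Chars.find_spec (s := d) (sub := sub) hnn
  rcases lt_trichotomy ((PySem.Chars.find d sub).toNat) k with hlt | heq | hgt
  · exact absurd hspec.1 (hmin _ hlt)
  · omega
  · exact absurd hk (hspec.2 k hgt)

theorem pv_find_short (d sub : List Char) (h : d.length < sub.length) :
    PySem.Chars.find d sub = -1 := by
  rw [PySem.Chars.find_eq_neg_one_iff]
  intro hinf
  have := hinf.length_le
  omega

theorem pv_find_cons (c : Char) (rest sub : List Char) (hnp : ¬ sub <+: c :: rest) :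
    PySem.Chars.find (c :: rest) sub =
      (if PySem.Chars.find rest sub = -1 then -1 else PySem.Chars.find rest sub + 1) := by
  split
  · rename_i hr
    rw [PySem.Chars.find_eq_neg_one_iff] at hr ⊢
    intro hinf
    rcases List.infix_cons_iff.mp hinf with hpre | hinf'
    · exact hnp hpre
    · exact hr hinf'
  · rename_i hr
    have hnn : 0 ≤ PySem.Chars.find rest sub := by
      have := PySem.Chars.neg_one_le_find rest sub
      omega
    have hspec := PySem.Chars.find_spec (s := rest) (sub := sub) hnn
    have hk : sub <+: (c :: rest).drop ((PySem.Chars.find rest sub).toNat + 1) := by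
      simpa using hspec.1
    have heq := pv_find_eq (c :: rest) sub ((PySem.Chars.find rest sub).toNat + 1) hk ?_
    · rw [heq]; omega
    · intro i hi
      match i with
      | 0 => simpa using hnp
      | Nat.succ m =>
        have hm : m < (PySem.Chars.find rest sub).toNat := by omega
        simpa using hspec.2 m hm

-- pvSepsB characterized by Chars.find
theorem pv_seps_char (d : List Char) (base : Int) :
    pvSepsB d base =
      (if PySem.Chars.find d ['\n', '\n'] = -1 then []
       else (base + PySem.Chars.find d ['\n', '\n']) ::
            pvSepsB (d.drop ((PySem.Chars.find d ['\n', '\n']).toNat + 2))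
                    (base + PySem.Chars.find d ['\n', '\n'] + 2)) := by
  match d with
  | [] =>
    rw [pv_find_short [] ['\n', '\n'] (by simp)]
    simp [pvSepsB]
  | [c] =>
    rw [pv_find_short [c] ['\n', '\n'] (by simp)]
    simp [pvSepsB]
  | c1 :: c2 :: rest =>
    by_cases hc : c1 = '\n' ∧ c2 = '\n'
    · obtain ⟨h1, h2⟩ := hc
      subst h1; subst h2
      have hf : PySem.Chars.find ('\n' :: '\n' :: rest) ['\n', '\n'] = ((0 : Nat) : Int) := by
        refine pv_find_eq _ _ 0 ?_ ?_
        · exact ⟨rest, rfl⟩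
        · intro i hi; omega
      rw [hf]
      simp [pvSepsB]
    · have hnp : ¬ ['\n', '\n'] <+: c1 :: c2 :: rest := by
        intro ⟨s, hs⟩
        simp at hs
        exact hc ⟨hs.1.symm, hs.2.1.symm⟩
      rw [pv_find_cons c1 (c2 :: rest) ['\n', '\n'] hnp]
      have hlhs : pvSepsB (c1 :: c2 :: rest) base = pvSepsB (c2 :: rest) (base + 1) := by
        simp [pvSepsB, hc]
      rw [hlhs, pv_seps_char (c2 :: rest) (base + 1)]
      by_cases hr : PySem.Chars.find (c2 :: rest) ['\n', '\n'] = -1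
      · simp [hr]
      · have hnn : 0 ≤ PySem.Chars.find (c2 :: rest) ['\n', '\n'] := by
          have := PySem.Chars.neg_one_le_find (c2 :: rest) ['\n', '\n']
          omega
        have hne' : ¬ (PySem.Chars.find (c2 :: rest) ['\n', '\n'] + 1 = -1) := by omega
        simp only [hr, if_false, hne', if_false]
        have htn : (PySem.Chars.find (c2 :: rest) ['\n', '\n'] + 1).toNat
            = (PySem.Chars.find (c2 :: rest) ['\n', '\n']).toNat + 1 := by omega
        rw [htn]
        have hd : List.drop ((PySem.Chars.find (c2 :: rest) ['\n', '\n']).toNat + 1 + 2) (c1 :: c2 :: rest)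
            = List.drop ((PySem.Chars.find (c2 :: rest) ['\n', '\n']).toNat + 2) (c2 :: rest) := by
          conv_lhs => rw [show (PySem.Chars.find (c2 :: rest) ['\n', '\n']).toNat + 1 + 2
              = ((PySem.Chars.find (c2 :: rest) ['\n', '\n']).toNat + 2) + 1 from by omega]
          exact List.drop_succ_cons
        rw [hd,
          show base + (PySem.Chars.find (c2 :: rest) ['\n', '\n'] + 1) + 2
              = base + 1 + PySem.Chars.find (c2 :: rest) ['\n', '\n'] + 2 from by ring,
          show base + (PySem.Chars.find (c2 :: rest) ['\n', '\n'] + 1)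
              = base + 1 + PySem.Chars.find (c2 :: rest) ['\n', '\n'] from by ring]
termination_by d.length

-- occurrences are at least 2 before the end
theorem pv_find_room (d : List Char) (h : PySem.Chars.find d ['\n', '\n'] ≠ -1) :
    (PySem.Chars.find d ['\n', '\n']).toNat + 2 ≤ d.length := by
  have hnn : 0 ≤ PySem.Chars.find d ['\n', '\n'] := by
    have := PySem.Chars.neg_one_le_find d ['\n', '\n']
    omega
  have hspec := (PySem.Chars.find_spec (s := d) (sub := ['\n', '\n']) hnn).1
  have := hspec.length_le
  simp [List.length_drop] at this
  omega

-- A's loop from any start equals B's interval builder over B's separators of the suffix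
theorem pv_main (t : List Char) (start : Nat) (h : start ≤ t.length) :
    pvGoA t start =
      pvIntervalsB (t.length : Int) (pvSepsB (t.drop start) (start : Int)) (start : Int) := by
  by_cases hlt : start < t.length
  · have hff := PySem.Chars.findFrom_natCast t ['\n', '\n'] start h
    rw [pv_seps_char (t.drop start) (start : Int)]
    by_cases hf : PySem.Chars.find (t.drop start) ['\n', '\n'] = -1
    · -- no further separator: one final interval
      have he : pvEndA t start = (t.length : Int) := by
        unfold pvEndA
        rw [hff]
        simp [hf]
      rw [pvGoA, dif_pos hlt, he, if_pos hf]
      have hstop : pvGoA t ((t.length : Int).toNat + 2) = [] := by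
        rw [pvGoA]
        have hno : ¬ ((t.length : Int).toNat + 2 < t.length) := by omega
        rw [dif_neg hno]
      rw [hstop]
      simp only [pvIntervalsB]
      rw [if_pos (show ((start : Nat) : Int) < ((t.length : Nat) : Int) from by exact_mod_cast hlt)]
    · -- separator found at start + j
      set j := PySem.Chars.find (t.drop start) ['\n', '\n'] with hj
      have hnn : 0 ≤ j := by
        have := PySem.Chars.neg_one_le_find (t.drop start) ['\n', '\n']
        omega
      have hroom : j.toNat + 2 ≤ (t.drop start).length := pv_find_room (t.drop start) hf
      simp [List.length_drop] at hroom
      have he : pvEndA t start = (start : Int) + j := by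
        unfold pvEndA
        rw [hff]
        have : ¬ ((start : Int) + j = -1) := by omega
        simp [hf, this]
      have htn : ((start : Int) + j).toNat = start + j.toNat := by omega
      rw [pvGoA, dif_pos hlt, he, htn]
      have hih := pv_main t (start + j.toNat + 2) (by omega)
      rw [hih]
      simp only [pvIntervalsB, hf, if_false]
      have hdd : (t.drop start).drop (j.toNat + 2) = t.drop (start + j.toNat + 2) := by
        have hidx : start + (j.toNat + 2) = start + j.toNat + 2 := by omega
        rw [List.drop_drop, hidx]
      have hcast1 : (start : Int) + j + 2 = ((start + j.toNat + 2 : Nat) : Int) := by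
        push_cast; omega
      rw [hdd, hcast1]
  · -- start = len: loop ends, no trailing interval
    have hse : start = t.length := by omega
    rw [pvGoA, dif_neg hlt]
    rw [hse, List.drop_length]
    show [] = pvIntervalsB (t.length : Int) (pvSepsB [] (t.length : Int)) (t.length : Int)
    simp [pvSepsB, pvIntervalsB]
termination_by t.length + 1 - start
decreasing_by
  omega

-- ===== VERDICT (by name: the statement is the Claim_ definition above) =====
theorem get_clean_paragraph_indices_spec : Claim_equal_get_clean_paragraph_indices := by
  intro item _ hpre
  unfold Spec_get_clean_paragraph_indices
  unfold Pre_get_clean_paragraph_indices at hpre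
  unfold get_clean_paragraph_indices get_clean_paragraph_indices_alt
  cases htext : List.lookup "full_paper" item with
  | none => simp [htext] at hpre
  | some text =>
    have h0 := pv_main text.toList 0 (Nat.zero_le _)
    rw [List.drop_zero] at h0
    exact_mod_cast h0
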